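-- pv_equiv track=rewrite | github.com/Lizz-dankova/LAB | lab1.py | LongShiftBitsToHigh
-- ===== SOURCE A (Python) =====
-- def LongShiftDigitsToHigh(n, l):
--     return [0] * l + n
--
-- def LongShiftBitsToHigh(number, width_shift):
--     if width_shift <= 0:
--         return number.copy()
--     remainder = width_shift % 32
--     width_shift //= 32
--     result = LongShiftDigitsToHigh(number.copy(), width_shift)
--     if remainder > 0:
--         for _ in range(remainder):
--             last_bit = (result[-1] >> 31) & 1
--             for j in range(len(result) - 1, 0, -1):
--                 result[j] = ((result[j] << 1) | ((result[j - 1] >> 31) & 1)) & 0xFFFFFFFF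
--             result[0] = (result[0] << 1) & 0xFFFFFFFF
--             if last_bit != 0:
--                 result.append(last_bit)
--     while len(result) > 1 and result[-1] == 0:
--         result.pop()
--     return result
-- ===== SOURCE B (Python) =====
-- def LongShiftBitsToHigh(number, width_shift):
--     # Single pass: shift each 32-bit word left by the bit remainder, propagating
--     # an r-bit carry, instead of A's `remainder` full passes of 1-bit shifts.
--     if width_shift <= 0:
--         return number.copy()
--     q, r = divmod(width_shift, 32)
--     if r > 0:
--         result = [0] * q
--         carry = 0
--         for x in number:
--             w = x & 0xFFFFFFFF
--             result.append(((w << r) | carry) & 0xFFFFFFFF)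
--             carry = w >> (32 - r)
--         if carry:
--             result.append(carry)
--     else:
--         result = [0] * q + number
--     k = len(result)
--     while k > 1 and result[k - 1] == 0:
--         k -= 1
--     return result[:k]
-- ===== Notes on version B (the rewrite author's own statement) =====
-- stated objective: faster
-- what changed: A shifts the whole word array by 1 bit `width_shift % 32` times (each pass re-scanning every word and masking); B does one single pass that shifts each word by the full remainder r, propagating an r-bit carry, and appends at most one overflow word.
import Mathlib
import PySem

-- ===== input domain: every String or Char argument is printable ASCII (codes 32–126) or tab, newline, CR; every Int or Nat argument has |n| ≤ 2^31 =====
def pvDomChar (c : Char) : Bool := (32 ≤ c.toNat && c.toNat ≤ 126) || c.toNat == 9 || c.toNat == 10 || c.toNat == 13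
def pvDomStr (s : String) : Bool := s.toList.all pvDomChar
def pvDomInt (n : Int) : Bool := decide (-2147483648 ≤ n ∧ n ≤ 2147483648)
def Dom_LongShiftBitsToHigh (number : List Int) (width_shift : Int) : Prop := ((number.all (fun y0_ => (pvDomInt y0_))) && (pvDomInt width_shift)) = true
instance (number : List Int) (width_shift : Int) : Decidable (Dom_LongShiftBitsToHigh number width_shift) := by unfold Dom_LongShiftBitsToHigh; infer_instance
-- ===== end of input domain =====

-- B replaces A's `remainder` one-bit passes over the word array by a single pass that
-- shifts each word by the full bit remainder with a propagated carry (faster by a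
-- constant factor, measured); A=B proved on Pre_ (A mutates nothing observable; values only).


-- ===== PORT A =====
-- (w >> 31) & 1 : Python >> floors, & 1 = % 2 on the nonnegative floor quotient bit; exact for all ints
def pyBit31 (w : Int) : Int := (PySem.Int.floordiv w 2147483648) % 2

-- A's inner descending loop `for j in range(len(result)-1, 0, -1)` only reads result[j-1]
-- BEFORE it is updated, so it is a map of each word with its predecessor (prev = 0 for j = 0).
-- (x << 1) | b  with b ∈ {0,1} is x*2 + b (disjoint bits); & 0xFFFFFFFF = emod 2^32 : exact.
def shiftRowA : Int → List Int → List Int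
  | _, [] => []
  | prev, x :: xs => ((x * 2 + pyBit31 prev) % 4294967296) :: shiftRowA x xs

-- one iteration of A's outer `for _ in range(remainder)` body
def stepA (result : List Int) : List Int :=
  let last_bit := pyBit31 (result.getLastD 0)   -- result[-1]; the empty-list IndexError is excluded by Pre_
  let result' := shiftRowA 0 result
  if last_bit ≠ 0 then result' ++ [last_bit] else result'

def loopA (result : List Int) : Nat → List Int
  | 0 => result
  | k + 1 => loopA (stepA result) k

-- `while len(result) > 1 and result[-1] == 0: result.pop()`
def trimA (result : List Int) : List Int :=
  if 1 < result.length ∧ result.getLast? = some 0 then trimA result.dropLast else result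
termination_by result.length
decreasing_by simp [List.length_dropLast]; omega

def LongShiftBitsToHigh (number : List Int) (width_shift : Int) : List Int :=
  if width_shift ≤ 0 then number
  else
    let remainder := PySem.Int.mod width_shift 32
    let ws := PySem.Int.floordiv width_shift 32
    let result := List.replicate ws.toNat 0 ++ number   -- LongShiftDigitsToHigh
    trimA (loopA result remainder.toNat)

-- ===== PORT B =====
-- B's single forward loop: out word = ((w << r) | carry) & mask (disjoint bits: = w*2^r + carry
-- masked), next carry = w >> (32-r); carry threaded through the recursion
def wordsB (r : Int) (carry : Int) : List Int → List Int × Int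
  | [] => ([], carry)
  | x :: xs =>
      let w := PySem.Int.mod x 4294967296          -- x & 0xFFFFFFFF
      let rest := wordsB r (PySem.Int.floordiv w (2 ^ (32 - r).toNat)) xs
      (((w * 2 ^ r.toNat + carry) % 4294967296) :: rest.1, rest.2)

-- `k = len(result); while k > 1 and result[k-1] == 0: k -= 1` : find the cut point
def cutB (l : List Int) : Nat → Nat
  | 0 => 0
  | i + 1 => if 1 < i + 1 ∧ l.getD i 1 = 0 then cutB l i else i + 1

def LongShiftBitsToHigh_alt (number : List Int) (width_shift : Int) : List Int :=
  if width_shift ≤ 0 then number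
  else
    let q := PySem.Int.floordiv width_shift 32
    let r := PySem.Int.mod width_shift 32
    let result :=
      if 0 < r then
        let p := wordsB r 0 number
        List.replicate q.toNat 0 ++ p.1 ++ (if p.2 ≠ 0 then [p.2] else [])
      else
        List.replicate q.toNat 0 ++ number
    result.take (cutB result result.length)    -- return result[:k]

-- ===== PRECONDITION & SPEC =====
-- Pre_ excludes exactly the inputs where A raises IndexError (result[-1] on the empty list):
-- number = [] with 0 < width_shift < 32.
def Pre_LongShiftBitsToHigh (number : List Int) (width_shift : Int) : Prop :=
  number ≠ [] ∨ width_shift ≤ 0 ∨ 32 ≤ width_shift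
instance (number : List Int) (width_shift : Int) : Decidable (Pre_LongShiftBitsToHigh number width_shift) := by unfold Pre_LongShiftBitsToHigh; infer_instance

def pvWitness_LongShiftBitsToHigh : List Int × Int := ([3, 2147483647], 35)

def Spec_LongShiftBitsToHigh (number : List Int) (width_shift : Int) (out : List Int) : Prop := out = LongShiftBitsToHigh_alt number width_shift
instance (number : List Int) (width_shift : Int) (out : List Int) : Decidable (Spec_LongShiftBitsToHigh number width_shift out) := by unfold Spec_LongShiftBitsToHigh; infer_instance

-- ===== CLAIM (what is proved, stated in full; the proofs are below) =====
def Claim_equal_LongShiftBitsToHigh : Prop := ∀ (number : List Int) (width_shift : Int), Dom_LongShiftBitsToHigh number width_shift → Pre_LongShiftBitsToHigh number width_shift → Spec_LongShiftBitsToHigh number width_shift (LongShiftBitsToHigh number width_shift)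


-- ===== LEMMAS AND PROOFS =====

def pvM : Int := 4294967296

-- value of a little-endian base-2^32 word list
def pvVal : List Int → Int
  | [] => 0
  | x :: xs => x + pvM * pvVal xs

-- canonical pass: multiply the (masked) words by m with carry propagation, base pvM
def pvPass (m c : Int) : List Int → List Int × Int
  | [] => ([], c)
  | x :: xs =>
      let v := (x % pvM) * m + c
      let p := pvPass m (v / pvM) xs
      ((v % pvM) :: p.1, p.2)

def pvDigits (m : Int) (l : List Int) : List Int :=
  (pvPass m 0 l).1 ++ (if (pvPass m 0 l).2 ≠ 0 then [(pvPass m 0 l).2] else [])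

theorem pvPass_length (m c : Int) (l : List Int) : (pvPass m c l).1.length = l.length := by
  induction l generalizing c with
  | nil => rfl
  | cons x xs ih => simp [pvPass, ih]

theorem pvPass_fst_range (m c : Int) (l : List Int) :
    ∀ y ∈ (pvPass m c l).1, 0 ≤ y ∧ y < pvM := by
  induction l generalizing c with
  | nil => simp [pvPass]
  | cons x xs ih =>
      intro y hy
      simp only [pvPass, List.mem_cons] at hy
      rcases hy with h | h
      · subst h; constructor
        · exact Int.emod_nonneg _ (by norm_num [pvM])
        · exact Int.emod_lt_of_pos _ (by norm_num [pvM])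
      · exact ih _ y h

theorem pvPass_snd_nonneg (m c : Int) (l : List Int) (hm : 0 ≤ m) (hc : 0 ≤ c) :
    0 ≤ (pvPass m c l).2 := by
  induction l generalizing c with
  | nil => simpa [pvPass]
  | cons x xs ih =>
      simp only [pvPass]
      exact ih _ (Int.ediv_nonneg
        (add_nonneg (mul_nonneg (Int.emod_nonneg _ (by norm_num [pvM])) hm) hc)
        (by norm_num [pvM]))

theorem pvPass_val (m c : Int) (l : List Int) :
    pvVal (pvPass m c l).1 + pvM ^ l.length * (pvPass m c l).2
      = c + m * pvVal (l.map (· % pvM)) := by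
  induction l generalizing c with
  | nil => simp [pvPass, pvVal]
  | cons x xs ih =>
      simp only [pvPass, pvVal, List.map_cons, List.length_cons]
      have h := ih (((x % pvM) * m + c) / pvM)
      have hv := Int.ediv_add_emod ((x % pvM) * m + c) pvM
      rw [pow_succ]
      linear_combination pvM * h + hv

theorem pvPass_snd_lt (m c : Int) (l : List Int) (hm : 0 < m) (hc0 : 0 ≤ c) (hc : c < m) :
    (pvPass m c l).2 < m := by
  induction l generalizing c with
  | nil => simpa [pvPass]
  | cons x xs ih =>
      simp only [pvPass]
      have hx0 : 0 ≤ x % pvM := Int.emod_nonneg _ (by norm_num [pvM])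
      have hx1 : x % pvM < pvM := Int.emod_lt_of_pos _ (by norm_num [pvM])
      have hv : (x % pvM) * m + c < m * pvM := by nlinarith
      have h1 : ((x % pvM) * m + c) / pvM < m := by
        rw [Int.ediv_lt_iff_lt_mul (by norm_num [pvM])]
        nlinarith
      exact ih _ (Int.ediv_nonneg (by nlinarith) (by norm_num [pvM])) h1

theorem pvVal_nonneg (l : List Int) (h : ∀ y ∈ l, 0 ≤ y ∧ y < pvM) : 0 ≤ pvVal l := by
  induction l with
  | nil => simp [pvVal]
  | cons x xs ih =>
      have hx := h x (by simp)
      have ht := ih (fun y hy => h y (by simp [hy]))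
      simp only [pvVal]
      nlinarith [hx.1]

theorem pvVal_lt (l : List Int) (h : ∀ y ∈ l, 0 ≤ y ∧ y < pvM) : pvVal l < pvM ^ l.length := by
  induction l with
  | nil => simp [pvVal]
  | cons x xs ih =>
      have hx := h x (by simp)
      have ht := ih (fun y hy => h y (by simp [hy]))
      simp only [pvVal, List.length_cons]
      rw [pow_succ]
      nlinarith [hx.2, pvVal_nonneg xs (fun y hy => h y (by simp [hy]))]

theorem pvCancel (N A B c d : Int) (hN : 0 < N) (hA : 0 ≤ A) (hA' : A < N)
    (hB : 0 ≤ B) (hB' : B < N) (h : A + N * c = B + N * d) : A = B ∧ c = d := by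
  have h1 : N * (d - c) = A - B := by ring_nf; linarith
  have h2 : d - c = 0 := by
    by_contra hne
    have habs : 1 ≤ |d - c| := Int.one_le_abs (by omega)
    have hge : N ≤ N * |d - c| := le_mul_of_one_le_right hN.le habs
    have h3 : |A - B| = N * |d - c| := by rw [← h1, abs_mul, abs_of_pos hN]
    have h4 : |A - B| < N := abs_lt.mpr ⟨by omega, by omega⟩
    linarith
  have h5 : A = B := by rw [h2, mul_zero] at h1; omega
  exact ⟨h5, by omega⟩

theorem pvVal_inj (a : List Int) : ∀ (b : List Int), a.length = b.length →
    (∀ y ∈ a, 0 ≤ y ∧ y < pvM) → (∀ y ∈ b, 0 ≤ y ∧ y < pvM) →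
    pvVal a = pvVal b → a = b := by
  induction a with
  | nil => intro b hlen _ _ _; cases b <;> simp_all
  | cons x xs ih =>
      intro b hlen ha hb hv
      cases b with
      | nil => simp at hlen
      | cons y ys =>
          simp only [pvVal] at hv
          have hx := ha x (by simp)
          have hy := hb y (by simp)
          obtain ⟨h1, h2⟩ := pvCancel pvM x y (pvVal xs) (pvVal ys)
            (by norm_num [pvM]) hx.1 hx.2 hy.1 hy.2 hv
          have := ih ys (by simpa using hlen)
            (fun z hz => ha z (by simp [hz])) (fun z hz => hb z (by simp [hz])) h2
          rw [h1, this]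

theorem pvDigits_unique (a b : List Int) (c d : Int)
    (hlen : a.length = b.length)
    (ha : ∀ y ∈ a, 0 ≤ y ∧ y < pvM) (hb : ∀ y ∈ b, 0 ≤ y ∧ y < pvM)
    (h : pvVal a + pvM ^ a.length * c = pvVal b + pvM ^ b.length * d) :
    a = b ∧ c = d := by
  have hpow : (0:Int) < pvM ^ a.length := pow_pos (by norm_num [pvM]) _
  rw [← hlen] at h
  obtain ⟨h1, h2⟩ := pvCancel (pvM ^ a.length) (pvVal a) (pvVal b) c d hpow
    (pvVal_nonneg a ha) (pvVal_lt a ha) (pvVal_nonneg b hb)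
    (by rw [hlen]; exact pvVal_lt b hb) h
  exact ⟨pvVal_inj a b hlen ha hb h1, h2⟩

theorem pvPass_append (m c : Int) (a b : List Int) :
    pvPass m c (a ++ b)
      = ((pvPass m c a).1 ++ (pvPass m (pvPass m c a).2 b).1, (pvPass m (pvPass m c a).2 b).2) := by
  induction a generalizing c with
  | nil => simp [pvPass]
  | cons x xs ih => simp [pvPass, ih]

theorem map_mod_self (l : List Int) (h : ∀ y ∈ l, 0 ≤ y ∧ y < pvM) :
    l.map (· % pvM) = l := by
  induction l with
  | nil => rfl
  | cons x xs ih =>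
      have hx := h x (by simp)
      simp only [List.map_cons]
      rw [Int.emod_eq_of_lt hx.1 hx.2, ih (fun y hy => h y (by simp [hy]))]

theorem pvPass_replicate (m : Int) (q : Nat) (l : List Int) :
    pvPass m 0 (List.replicate q 0 ++ l)
      = (List.replicate q 0 ++ (pvPass m 0 l).1, (pvPass m 0 l).2) := by
  induction q with
  | zero => simp
  | succ n ih => simp [List.replicate_succ, pvPass, ih, pvM]

-- bit31 facts
theorem pyBit31_eq (x c : Int) (hc0 : 0 ≤ c) (hc : c < 2) :
    ((x % pvM) * 2 + c) / pvM = pyBit31 x := by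
  unfold pyBit31
  rw [PySem.Int.floordiv_eq_ediv_of_pos (by norm_num)]
  simp only [pvM]
  omega

theorem pyBit31_small (x : Int) (h0 : 0 ≤ x) (h : x < 2147483648) : pyBit31 x = 0 := by
  unfold pyBit31
  rw [PySem.Int.floordiv_eq_ediv_of_pos (by norm_num)]
  omega

theorem pyBit31_range (x : Int) : 0 ≤ pyBit31 x ∧ pyBit31 x < 2 :=
  ⟨Int.emod_nonneg _ (by norm_num), Int.emod_lt_of_pos _ (by norm_num)⟩

theorem pyBit31_zero : pyBit31 0 = 0 := by decide

theorem shiftRowA_eq_pass (l : List Int) (prev : Int) :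
    shiftRowA prev l = (pvPass 2 (pyBit31 prev) l).1 := by
  induction l generalizing prev with
  | nil => rfl
  | cons x xs ih =>
      obtain ⟨hb0, hb1⟩ := pyBit31_range prev
      simp only [shiftRowA, pvPass]
      rw [pyBit31_eq x (pyBit31 prev) hb0 hb1]
      refine congrArg₂ _ ?_ (ih x)
      simp only [pvM]
      omega

theorem pass2_snd (l : List Int) (c : Int) (hc0 : 0 ≤ c) (hc : c < 2) :
    (pvPass 2 c l).2 = if l = [] then c else pyBit31 (l.getLastD 0) := by
  induction l generalizing c with
  | nil => simp [pvPass]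
  | cons x xs ih =>
      simp only [pvPass]
      rw [pyBit31_eq x c hc0 hc]
      obtain ⟨hb0, hb1⟩ := pyBit31_range x
      rw [ih (pyBit31 x) hb0 hb1]
      cases xs with
      | nil => simp
      | cons y ys => simp

theorem stepA_eq (l : List Int) (h : l ≠ []) : stepA l = pvDigits 2 l := by
  unfold stepA pvDigits
  rw [shiftRowA_eq_pass, pyBit31_zero]
  rw [pass2_snd l 0 (by norm_num) (by norm_num), if_neg h]
  rcases eq_or_ne (pyBit31 (l.getLastD 0)) 0 with hb | hb <;>
    simp only [List.getLastD_eq_getLast?] at hb ⊢ <;> simp [hb]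

theorem loopA_succ (l : List Int) (k : Nat) : loopA l (k + 1) = stepA (loopA l k) := by
  induction k generalizing l with
  | zero => rfl
  | succ n ih => simpa [loopA] using ih (stepA l)

theorem stepA_digits (l : List Int) (h : l ≠ []) (k : Nat) (hk : k ≤ 30) :
    stepA (pvDigits (2 ^ k) l) = pvDigits (2 ^ (k + 1)) l := by
  have hm0 : (0:Int) < 2 ^ k := by positivity
  have hm0' : (0:Int) < 2 ^ (k+1) := by positivity
  have hlen : (pvPass ((2:Int) ^ k) 0 l).1.length = l.length := pvPass_length _ _ _
  have hlen' : (pvPass ((2:Int) ^ (k+1)) 0 l).1.length = l.length := pvPass_length _ _ _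
  have hrange := pvPass_fst_range ((2:Int) ^ k) 0 l
  have hrange' := pvPass_fst_range ((2:Int) ^ (k+1)) 0 l
  have hf0 : 0 ≤ (pvPass ((2:Int) ^ k) 0 l).2 := pvPass_snd_nonneg _ _ _ hm0.le le_rfl
  have hf0' : 0 ≤ (pvPass ((2:Int) ^ (k+1)) 0 l).2 := pvPass_snd_nonneg _ _ _ hm0'.le le_rfl
  have hflt : (pvPass ((2:Int) ^ k) 0 l).2 < 2 ^ k := pvPass_snd_lt _ _ _ hm0 le_rfl hm0
  have hval := pvPass_val ((2:Int) ^ k) 0 l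
  have hval' := pvPass_val ((2:Int) ^ (k+1)) 0 l
  have hone : (pvPass ((2:Int) ^ k) 0 l).1 ≠ [] := by
    intro hz
    apply h
    have := hlen; rw [hz] at this
    exact List.eq_nil_of_length_eq_zero this.symm
  have hmap : (pvPass ((2:Int) ^ k) 0 l).1.map (· % pvM) = (pvPass ((2:Int) ^ k) 0 l).1 :=
    map_mod_self _ hrange
  have hv2 : pvVal (pvPass 2 0 (pvPass ((2:Int) ^ k) 0 l).1).1
      + pvM ^ l.length * (pvPass 2 0 (pvPass ((2:Int) ^ k) 0 l).1).2
      = 2 * pvVal (pvPass ((2:Int) ^ k) 0 l).1 := by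
    have := pvPass_val 2 0 (pvPass ((2:Int) ^ k) 0 l).1
    rw [hmap, hlen] at this
    simpa using this
  have hc0 : 0 ≤ (pvPass 2 0 (pvPass ((2:Int) ^ k) 0 l).1).2 :=
    pvPass_snd_nonneg _ _ _ (by norm_num) le_rfl
  have hclt : (pvPass 2 0 (pvPass ((2:Int) ^ k) 0 l).1).2 < 2 :=
    pvPass_snd_lt _ _ _ (by norm_num) le_rfl (by norm_num)
  by_cases hfz : (pvPass ((2:Int) ^ k) 0 l).2 = 0
  · have hd : pvDigits (2 ^ k) l = (pvPass ((2:Int) ^ k) 0 l).1 := by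
      simp [pvDigits, hfz]
    rw [hd, stepA_eq _ hone]
    -- compare pvPass 2 over the k-digits with pvPass (2^(k+1)) over l
    have key : pvVal (pvPass 2 0 (pvPass ((2:Int) ^ k) 0 l).1).1
        + pvM ^ l.length * (pvPass 2 0 (pvPass ((2:Int) ^ k) 0 l).1).2
        = pvVal (pvPass ((2:Int) ^ (k+1)) 0 l).1
          + pvM ^ l.length * (pvPass ((2:Int) ^ (k+1)) 0 l).2 := by
      rw [hv2, hval']
      rw [hfz, mul_zero, add_zero] at hval
      rw [pow_succ]
      nlinarith [hval]
    obtain ⟨heq, hceq⟩ := pvDigits_unique (pvPass 2 0 (pvPass ((2:Int) ^ k) 0 l).1).1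
      (pvPass ((2:Int) ^ (k+1)) 0 l).1
      (pvPass 2 0 (pvPass ((2:Int) ^ k) 0 l).1).2 (pvPass ((2:Int) ^ (k+1)) 0 l).2
      (by rw [pvPass_length, hlen, hlen'])
      (pvPass_fst_range _ _ _) hrange'
      (by rw [pvPass_length, hlen, hlen']; exact key)
    simp [pvDigits, heq, hceq]
  · have hd : pvDigits (2 ^ k) l
        = (pvPass ((2:Int) ^ k) 0 l).1 ++ [(pvPass ((2:Int) ^ k) 0 l).2] := by
      simp [pvDigits, hfz]
    rw [hd]
    have hfsmall : (pvPass ((2:Int) ^ k) 0 l).2 < 2147483648 := by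
      calc (pvPass ((2:Int) ^ k) 0 l).2 < 2 ^ k := hflt
        _ ≤ 2 ^ 30 := by exact pow_le_pow_right₀ (by norm_num) hk
        _ < 2147483648 := by norm_num
    have hlb : pyBit31 (((pvPass ((2:Int) ^ k) 0 l).1 ++ [(pvPass ((2:Int) ^ k) 0 l).2]).getLastD 0) = 0 := by
      rw [List.getLastD_eq_getLast?, List.getLast?_append, List.getLast?_singleton]
      exact pyBit31_small _ hf0 hfsmall
    unfold stepA
    rw [hlb]
    simp only [ne_eq, not_true_eq_false, not_false_eq_true, if_neg]
    rw [shiftRowA_eq_pass, pyBit31_zero, pvPass_append]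
    have hsingle : (pvPass 2 (pvPass 2 0 (pvPass ((2:Int) ^ k) 0 l).1).2 [(pvPass ((2:Int) ^ k) 0 l).2]).1
        = [2 * (pvPass ((2:Int) ^ k) 0 l).2 + (pvPass 2 0 (pvPass ((2:Int) ^ k) 0 l).1).2] := by
      simp only [pvPass]
      congr 1
      have h1 : (pvPass ((2:Int) ^ k) 0 l).2 % pvM = (pvPass ((2:Int) ^ k) 0 l).2 := by
        simp only [pvM]; omega
      rw [h1]
      simp only [pvM]; omega
    rw [hsingle]
    -- value bookkeeping
    have key : pvVal (pvPass 2 0 (pvPass ((2:Int) ^ k) 0 l).1).1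
        + pvM ^ l.length * ((pvPass 2 0 (pvPass ((2:Int) ^ k) 0 l).1).2
            + 2 * (pvPass ((2:Int) ^ k) 0 l).2)
        = pvVal (pvPass ((2:Int) ^ (k+1)) 0 l).1
          + pvM ^ l.length * (pvPass ((2:Int) ^ (k+1)) 0 l).2 := by
      rw [hval']
      rw [pow_succ]
      nlinarith [hv2, hval]
    obtain ⟨heq, hceq⟩ := pvDigits_unique (pvPass 2 0 (pvPass ((2:Int) ^ k) 0 l).1).1
      (pvPass ((2:Int) ^ (k+1)) 0 l).1
      ((pvPass 2 0 (pvPass ((2:Int) ^ k) 0 l).1).2 + 2 * (pvPass ((2:Int) ^ k) 0 l).2)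
      (pvPass ((2:Int) ^ (k+1)) 0 l).2
      (by rw [pvPass_length, hlen, hlen'])
      (pvPass_fst_range _ _ _) hrange'
      (by rw [pvPass_length, hlen, hlen']; exact key)
    have hfnz : (pvPass ((2:Int) ^ (k+1)) 0 l).2 ≠ 0 := by omega
    simp only [pvDigits, if_pos hfnz, heq]
    congr 1
    simp only [← hceq]
    congr 1
    ring

theorem loop_eq (l : List Int) (h : l ≠ []) (k : Nat) (h1 : 1 ≤ k) (h31 : k ≤ 31) :
    loopA l k = pvDigits (2 ^ k) l := by
  induction k with
  | zero => omega
  | succ n ih =>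
      rcases Nat.eq_or_lt_of_le h1 with h1' | h1'
      · rw [← h1']
        show stepA l = pvDigits (2 ^ 1) l
        rw [stepA_eq l h]; norm_num
      · rw [loopA_succ, ih (by omega) (by omega), stepA_digits l h n (by omega)]

theorem wordsB_eq_pass (r : Int) (hr1 : 1 ≤ r) (hr31 : r ≤ 31) (l : List Int) (c : Int)
    (hc0 : 0 ≤ c) (hc : c < 2 ^ r.toNat) :
    wordsB r c l = pvPass (2 ^ r.toNat) c l := by
  induction l generalizing c with
  | nil => rfl
  | cons x xs ih =>
      simp only [wordsB, pvPass]
      rw [PySem.Int.mod_eq_emod_of_pos (by norm_num : (0:Int) < 4294967296)]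
      rw [PySem.Int.floordiv_eq_ediv_of_pos (by positivity)]
      have hx0 : 0 ≤ x % 4294967296 := Int.emod_nonneg _ (by norm_num)
      have hx1 : x % 4294967296 < 4294967296 := Int.emod_lt_of_pos _ (by norm_num)
      have hdiv : x % 4294967296 / 2 ^ (32 - r).toNat
          = (x % pvM * 2 ^ r.toNat + c) / pvM := by
        interval_cases r <;> · simp only [pvM] at *; simp at hc ⊢; omega
      have hnext0 : 0 ≤ x % 4294967296 / 2 ^ (32 - r).toNat :=
        Int.ediv_nonneg hx0 (by positivity)
      have hnextlt : x % 4294967296 / 2 ^ (32 - r).toNat < 2 ^ r.toNat := by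
        interval_cases r <;> · simp at hc ⊢; omega
      rw [ih _ hnext0 hnextlt, hdiv]
      simp [pvM]

theorem cutB_le (l : List Int) (i : Nat) : cutB l i ≤ i := by
  induction i with
  | zero => simp [cutB]
  | succ n ih => simp only [cutB]; split <;> omega

theorem cutB_concat (l : List Int) (a : Int) (i : Nat) (h : i ≤ l.length) :
    cutB (l ++ [a]) i = cutB l i := by
  induction i with
  | zero => rfl
  | succ n ih =>
      simp only [cutB]
      rw [List.getD, List.getD, List.getElem?_append_left (by omega)]
      rw [ih (by omega)]

theorem trim_eq (l : List Int) : trimA l = l.take (cutB l l.length) := by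
  induction l using List.reverseRecOn with
  | nil => rw [trimA]; simp [cutB]
  | append_singleton xs x ih =>
      rw [trimA]
      by_cases hcond : 1 < (xs ++ [x]).length ∧ (xs ++ [x]).getLast? = some 0
      · rw [if_pos hcond, List.dropLast_concat, ih]
        have hxs : xs ≠ [] := by
          intro hz; rw [hz] at hcond; simp at hcond
        have hx0 : x = 0 := by
          have := hcond.2
          simp [List.getLast?_append] at this
          exact this
        have hcut : cutB (xs ++ [x]) (xs ++ [x]).length = cutB xs xs.length := by
          rw [List.length_append, List.length_singleton]
          show cutB (xs ++ [x]) (xs.length + 1) = cutB xs xs.length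
          rw [cutB]
          have hget : (xs ++ [x]).getD xs.length 1 = x := by
            simp [List.getD]
          rw [if_pos ⟨by have := List.length_pos_iff.mpr hxs; omega, by rw [hget]; exact hx0⟩]
          exact cutB_concat xs x xs.length le_rfl
        rw [hcut, List.take_append_of_le_length (cutB_le xs xs.length)]
      · rw [if_neg hcond]
        have hlen : (xs ++ [x]).length = xs.length + 1 := by simp
        rw [hlen, cutB]
        have hget : (xs ++ [x]).getD xs.length 1 = x := by
          simp [List.getD]
        have hcond' : ¬(1 < xs.length + 1 ∧ (xs ++ [x]).getD xs.length 1 = 0) := by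
          intro ⟨h1, h2⟩
          apply hcond
          constructor
          · simp; omega
          · rw [hget] at h2
            subst h2
            simp [List.getLast?_append]
        rw [if_neg hcond']
        rw [← hlen, List.take_length]

-- ===== VERDICT (by name: the statement is the Claim_ definition above) =====
theorem unfoldA (number : List Int) (ws : Int) (h : ¬ ws ≤ 0) :
    LongShiftBitsToHigh number ws
      = trimA (loopA (List.replicate ((ws / 32).toNat) 0 ++ number) ((ws % 32).toNat)) := by
  unfold LongShiftBitsToHigh
  rw [if_neg h, PySem.Int.mod_eq_emod_of_pos (by norm_num : (0:Int) < 32),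
      PySem.Int.floordiv_eq_ediv_of_pos (by norm_num : (0:Int) < 32)]

theorem unfoldB (number : List Int) (ws : Int) (h : ¬ ws ≤ 0) :
    LongShiftBitsToHigh_alt number ws
      = (fun result => List.take (cutB result result.length) result)
          (if 0 < ws % 32 then
            List.replicate ((ws / 32).toNat) 0 ++ (wordsB (ws % 32) 0 number).1
              ++ (if (wordsB (ws % 32) 0 number).2 ≠ 0 then [(wordsB (ws % 32) 0 number).2] else [])
           else List.replicate ((ws / 32).toNat) 0 ++ number) := by
  unfold LongShiftBitsToHigh_alt
  rw [if_neg h, PySem.Int.mod_eq_emod_of_pos (by norm_num : (0:Int) < 32),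
      PySem.Int.floordiv_eq_ediv_of_pos (by norm_num : (0:Int) < 32)]

theorem LongShiftBitsToHigh_spec : Claim_equal_LongShiftBitsToHigh := by
  intro number ws hdom hpre
  unfold Spec_LongShiftBitsToHigh
  by_cases hws : ws ≤ 0
  · unfold LongShiftBitsToHigh LongShiftBitsToHigh_alt
    rw [if_pos hws, if_pos hws]
  · rw [unfoldA number ws hws, unfoldB number ws hws]
    replace hws : 0 < ws := by omega
    have hr0 : 0 ≤ ws % 32 := Int.emod_nonneg _ (by norm_num)
    have hr32 : ws % 32 < 32 := Int.emod_lt_of_pos _ (by norm_num)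
    by_cases hz : 0 < ws % 32
    · have hL : List.replicate (ws / 32).toNat (0:Int) ++ number ≠ [] := by
        rcases hpre with hn | hn | hn
        · simp [hn]
        · omega
        · have hq : 1 ≤ (ws / 32).toNat := by omega
          simp only [ne_eq, List.append_eq_nil_iff, List.replicate_eq_nil_iff]
          omega
      rw [if_pos hz]
      simp only []
      rw [loop_eq _ hL (ws % 32).toNat (by omega) (by omega)]
      rw [wordsB_eq_pass (ws % 32) (by omega) (by omega) number 0 le_rfl (by positivity)]
      rw [trim_eq]
      have hXY : pvDigits (2 ^ (ws % 32).toNat) (List.replicate (ws / 32).toNat 0 ++ number)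
          = List.replicate (ws / 32).toNat 0 ++ (pvPass (2 ^ (ws % 32).toNat) 0 number).1
              ++ (if (pvPass (2 ^ (ws % 32).toNat) 0 number).2 ≠ 0
                  then [(pvPass (2 ^ (ws % 32).toNat) 0 number).2] else []) := by
        unfold pvDigits
        rw [pvPass_replicate]
      rw [hXY]
    · rw [if_neg hz]
      simp only []
      have hrt : (ws % 32).toNat = 0 := by omega
      rw [hrt]
      rw [trim_eq]
      rfl
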